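-- pv_equiv track=rewrite | github.com/tempifyOS/steganography-project | find runs test func thing v4.py | count_runs
-- ===== SOURCE A (Python) =====
-- def count_runs(s, M):
--     """Count the number of runs of length >= M in the string."""
--     count = 0
--     i = 0
--     n = len(s)
--
--     while i < n:
--         run_char = s[i]
--         start = i
--         while i < n and s[i] == run_char:
--             i += 1
--         if i - start >= M:
--             count += 1
--
--     return count
-- ===== SOURCE B (Python) =====
-- def count_runs(s, M):
--     """Count the number of runs of length >= M in the string."""
--     n = len(s)
--     starts = [i for i in range(n) if i == 0 or s[i] != s[i - 1]]
--     starts.append(n)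
--     return sum(b - a >= M for a, b in zip(starts, starts[1:]))
-- ===== Notes on version B (the rewrite author's own statement) =====
-- stated objective: alternative
-- what changed: B works in staged passes: it first materialises the list of run-start boundary indices (positions where the character differs from its predecessor, plus the end index n) and then counts adjacent boundary pairs whose gap is >= M, instead of A's run-consuming two-pointer index walk.
import Mathlib
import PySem

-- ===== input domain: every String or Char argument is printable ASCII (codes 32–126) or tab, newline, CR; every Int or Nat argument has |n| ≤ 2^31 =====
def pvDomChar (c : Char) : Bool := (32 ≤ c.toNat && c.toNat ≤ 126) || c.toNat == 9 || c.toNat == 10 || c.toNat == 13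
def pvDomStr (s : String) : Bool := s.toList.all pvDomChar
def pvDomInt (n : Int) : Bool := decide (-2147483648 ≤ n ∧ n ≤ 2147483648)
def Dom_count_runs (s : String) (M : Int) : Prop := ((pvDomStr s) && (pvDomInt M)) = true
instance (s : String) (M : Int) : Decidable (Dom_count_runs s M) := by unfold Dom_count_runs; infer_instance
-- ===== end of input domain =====

-- B replaces A's run-consuming two-pointer walk with staged passes: build the list of run-start boundaries (plus n), then count adjacent boundary pairs with gap >= M; same O(n) cost, different decomposition.


-- ===== PORT A =====
-- inner while loop: 'while i < n and s[i] == run_char: i += 1' (fuel = remaining indices, a totality device only)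
def innerA (cs : List Char) (c : Char) : Nat → Nat → Nat
  | 0, i => i
  | fuel + 1, i =>
    if h : i < cs.length then
      if cs[i] == c then innerA cs c fuel (i + 1) else i
    else i

-- outer while loop over index i with accumulator count (fuel = totality device; one unit per outer iteration)
def outerA (M : Int) (cs : List Char) : Nat → Nat → Int → Int
  | 0, _, count => count
  | fuel + 1, i, count =>
    if h : i < cs.length then
      let c := cs[i]
      let j := innerA cs c (cs.length - i) i
      outerA M cs fuel j (if (j : Int) - (i : Int) ≥ M then count + 1 else count)
    else count

def count_runs (s : String) (M : Int) : Int :=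
  outerA M s.toList (s.toList.length + 1) 0 0

-- ===== PORT B =====
-- 'starts = [i for i in range(n) if i == 0 or s[i] != s[i-1]]' (indices are in range, so getD reads the actual character)
def startsB (cs : List Char) : List Nat :=
  (List.range cs.length).filter (fun i => i == 0 || !(cs.getD i ' ' == cs.getD (i - 1) ' '))

-- 'sum(b - a >= M for a, b in zip(starts, starts[1:]))'
def count_runs_alt (s : String) (M : Int) : Int :=
  let n := s.toList.length
  let starts := startsB s.toList ++ [n]
  (starts.zip starts.tail).foldl
    (fun acc p => if (p.2 : Int) - (p.1 : Int) ≥ M then acc + 1 else acc) 0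

-- ===== PRECONDITION & SPEC =====
def Spec_count_runs (s : String) (M : Int) (out : Int) : Prop := out = count_runs_alt s M
instance (s : String) (M : Int) (out : Int) : Decidable (Spec_count_runs s M out) := by unfold Spec_count_runs; infer_instance

-- ===== CLAIM (what is proved, stated in full; the proofs are below) =====
def Claim_equal_count_runs : Prop := ∀ (s : String) (M : Int), Dom_count_runs s M → Spec_count_runs s M (count_runs s M)

-- ===== LEMMAS AND PROOFS =====

-- reference value: contribution of the runs in the list, given a current run of char c with length k
def runAux (M : Int) : Char → Int → List Char → Int
  | _, k, [] => if k ≥ M then 1 else 0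
  | c, k, x :: xs =>
    if x == c then runAux M c (k + 1) xs
    else (if k ≥ M then 1 else 0) + runAux M x 1 xs

-- reference value: number of maximal runs of length ≥ M
def countSpec (M : Int) : List Char → Int
  | [] => 0
  | c :: cs => runAux M c 1 cs

theorem dropWhile_eq_drop_len (p : Char → Bool) (l : List Char) :
    l.dropWhile p = l.drop (l.takeWhile p).length := by
  calc l.dropWhile p
      = (l.takeWhile p ++ l.dropWhile p).drop (l.takeWhile p).length := by
        rw [List.drop_left]
    _ = l.drop (l.takeWhile p).length := by
        rw [List.takeWhile_append_dropWhile]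

theorem runAux_spec (M : Int) (l : List Char) : ∀ (c : Char) (k : Int),
    runAux M c k l
      = (if (((l.takeWhile (· == c)).length : Int) + k ≥ M) then 1 else 0)
        + countSpec M (l.dropWhile (· == c)) := by
  induction l with
  | nil => intro c k; simp [runAux, countSpec]
  | cons x xs ih =>
    intro c k
    by_cases hx : x = c
    · subst hx
      rw [runAux, if_pos (show (x == x) = true by simp), ih,
        List.takeWhile_cons_of_pos (p := (· == x)) (by simp),
        List.dropWhile_cons_of_pos (p := (· == x)) (by simp),
        List.length_cons]
      push_cast
      split_ifs <;> omega
    · rw [runAux, if_neg (show ¬((x == c) = true) by simp [hx]),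
        List.takeWhile_cons_of_neg (p := (· == c)) (by simp [hx]),
        List.dropWhile_cons_of_neg (p := (· == c)) (by simp [hx]),
        countSpec]
      simp only [List.length_nil]
      push_cast
      split_ifs <;> omega

theorem innerA_spec (cs : List Char) (c : Char) : ∀ (fuel i : Nat),
    cs.length - i ≤ fuel →
    innerA cs c fuel i = i + ((cs.drop i).takeWhile (· == c)).length := by
  intro fuel
  induction fuel with
  | zero =>
    intro i hf
    rw [innerA, List.drop_eq_nil_of_le (by omega)]
    simp
  | succ fuel ih =>
    intro i hf
    by_cases h : i < cs.length
    · rw [innerA]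
      simp only [h, dite_true]
      by_cases hc : cs[i] == c
      · rw [if_pos hc, ih (i + 1) (by omega), List.drop_eq_getElem_cons h,
          List.takeWhile_cons_of_pos (p := (· == c)) hc]
        simp
        omega
      · rw [if_neg hc, List.drop_eq_getElem_cons h,
          List.takeWhile_cons_of_neg (p := (· == c)) (by simpa using hc)]
        simp
    · rw [innerA]
      simp only [h, dite_false]
      rw [List.drop_eq_nil_of_le (by omega)]
      simp

theorem outerA_spec (M : Int) (cs : List Char) : ∀ (fuel i : Nat) (count : Int),
    cs.length - i < fuel →
    outerA M cs fuel i count = count + countSpec M (cs.drop i) := by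
  intro fuel
  induction fuel with
  | zero => intro i count hf; omega
  | succ fuel ih =>
    intro i count hf
    by_cases h : i < cs.length
    · rw [outerA]
      simp only [h, dite_true]
      have hin : innerA cs cs[i] (cs.length - i) i
          = i + (1 + ((cs.drop (i+1)).takeWhile (· == cs[i])).length) := by
        rw [innerA_spec cs cs[i] (cs.length - i) i (by omega),
          List.drop_eq_getElem_cons h,
          List.takeWhile_cons_of_pos (p := (· == cs[i])) (by simp)]
        simp
        omega
      have hdw : cs.drop (innerA cs cs[i] (cs.length - i) i)
          = (cs.drop (i+1)).dropWhile (· == cs[i]) := by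
        rw [hin, dropWhile_eq_drop_len, List.drop_drop]
        congr 1
        omega
      rw [ih _ _ (by omega), hdw]
      conv_rhs => rw [List.drop_eq_getElem_cons h]
      rw [countSpec, runAux_spec, hin]
      push_cast
      split_ifs <;> omega
    · rw [outerA]
      simp only [h, dite_false]
      rw [List.drop_eq_nil_of_le (by omega), countSpec]
      omega

-- change indices: positions (from j on) where the character differs from its predecessor
def changeIdx : Char → Nat → List Char → List Nat
  | _, _, [] => []
  | prev, j, x :: xs => (if x = prev then [] else [j]) ++ changeIdx x (j + 1) xs

-- adjacent-pair count of a boundary list (zcountAux carries the previous boundary)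
def zcountAux (M : Int) : Nat → List Nat → Int
  | _, [] => 0
  | a, b :: r => (if (b : Int) - (a : Int) ≥ M then 1 else 0) + zcountAux M b r

def zcount (M : Int) : List Nat → Int
  | [] => 0
  | a :: r => zcountAux M a r

theorem zcountAux_cons (M : Int) (a b : Nat) (r : List Nat) :
    zcountAux M a (b :: r) = (if (b : Int) - (a : Int) ≥ M then 1 else 0) + zcountAux M b r := rfl

theorem zcount_cons (M : Int) (a : Nat) (r : List Nat) :
    zcount M (a :: r) = zcountAux M a r := rfl

theorem foldB_eq_zcountAux (M : Int) : ∀ (r : List Nat) (a : Nat) (acc : Int),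
    (((a :: r).zip r).foldl
      (fun acc p => if (p.2 : Int) - (p.1 : Int) ≥ M then acc + 1 else acc) acc)
      = acc + zcountAux M a r := by
  intro r
  induction r with
  | nil => intro a acc; simp [zcountAux]
  | cons b r ih =>
    intro a acc
    rw [List.zip_cons_cons, List.foldl_cons, ih, zcountAux]
    split_ifs <;> omega

theorem foldB_eq_zcount (M : Int) (l : List Nat) (acc : Int) :
    (l.zip l.tail).foldl
      (fun acc p => if (p.2 : Int) - (p.1 : Int) ≥ M then acc + 1 else acc) acc
      = acc + zcount M l := by
  cases l with
  | nil => simp [zcount]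
  | cons a r => rw [List.tail_cons, foldB_eq_zcountAux, zcount]

theorem zcountAux_changeIdx (M : Int) : ∀ (cs : List Char) (c : Char) (a j : Nat),
    zcountAux M a (changeIdx c j cs ++ [j + cs.length])
      = runAux M c ((j : Int) - (a : Int)) cs := by
  intro cs
  induction cs with
  | nil =>
    intro c a j
    simp [changeIdx, zcountAux, runAux]
  | cons x xs ih =>
    intro c a j
    by_cases hx : x = c
    · subst hx
      rw [changeIdx, if_pos rfl, runAux, if_pos (show (x == x) = true by simp)]
      have : j + (x :: xs).length = (j + 1) + xs.length := by simp; omega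
      rw [this, List.nil_append, ih]
      congr 1
      push_cast
      omega
    · rw [changeIdx, if_neg hx, runAux, if_neg (show ¬((x == c) = true) by simp [hx])]
      have hlen : j + (x :: xs).length = (j + 1) + xs.length := by simp; omega
      rw [hlen]
      simp only [List.cons_append, List.nil_append]
      rw [zcountAux_cons, ih]
      congr 2
      push_cast
      omega

theorem startsB_range' (t : List Char) : ∀ (k j : Nat), 1 ≤ j → j + k = t.length →
    (List.range' j k).filter (fun i => i == 0 || !(t.getD i ' ' == t.getD (i - 1) ' '))
      = changeIdx (t.getD (j - 1) ' ') j (t.drop j) := by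
  intro k
  induction k with
  | zero =>
    intro j h1 h2
    rw [List.range'_zero, List.drop_eq_nil_of_le (by omega)]
    simp [changeIdx]
  | succ k ih =>
    intro j h1 h2
    have hj : j < t.length := by omega
    have hgd : t.getD j ' ' = t[j] := List.getD_eq_getElem t ' ' hj
    rw [List.range'_succ, List.filter_cons, List.drop_eq_getElem_cons hj, changeIdx,
      ih (j + 1) (by omega) (by omega)]
    have hprev : t.getD ((j + 1) - 1) ' ' = t[j] := by simpa using hgd
    rw [hprev]
    have hj0 : (j == 0) = false := by simp; omega
    by_cases hx : t[j] = t.getD (j - 1) ' '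
    · have hcond : (j == 0 || !(t.getD j ' ' == t.getD (j - 1) ' ')) = false := by
        rw [hj0, hgd, hx]; simp
      rw [hcond]
      have hx' : t[j] = t[j - 1]?.getD ' ' := by
        rw [List.getD_eq_getElem?_getD] at hx; exact hx
      simp [hx']
    · have hx' : ¬ t[j] = t[j - 1]?.getD ' ' := by
        rw [List.getD_eq_getElem?_getD] at hx; exact hx
      have hcond : (j == 0 || !(t.getD j ' ' == t.getD (j - 1) ' ')) = true := by
        rw [hj0, hgd]; simp [List.getD_eq_getElem?_getD, hx']
      rw [hcond]
      simp [hx']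

theorem alt_spec (s : String) (M : Int) : count_runs_alt s M = countSpec M s.toList := by
  unfold count_runs_alt
  rw [foldB_eq_zcount]
  cases h : s.toList with
  | nil => simp [startsB, zcount, zcountAux, countSpec]
  | cons c cs =>
    have hstarts : startsB (c :: cs) = 0 :: changeIdx c 1 cs := by
      unfold startsB
      rw [show (c :: cs).length = cs.length + 1 from by simp,
        List.range_eq_range', List.range'_succ, List.filter_cons]
      have hp0 : (((0 : Nat) == 0 || !((c :: cs).getD 0 ' ' == (c :: cs).getD (0 - 1) ' '))) = true := by
        simp
      rw [hp0, if_pos rfl,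
        show (0 : Nat) + 1 = 1 from rfl,
        startsB_range' (c :: cs) cs.length 1 (by omega) (by simp; omega)]
      simp
    have hn : (c :: cs).length = 1 + cs.length := by simp; omega
    rw [hstarts, List.cons_append, zcount_cons, hn, zcountAux_changeIdx]
    norm_num [countSpec]

-- ===== VERDICT (by name: the statement is the Claim_ definition above) =====
theorem count_runs_spec : Claim_equal_count_runs := by
  intro s M _
  unfold Spec_count_runs count_runs
  rw [alt_spec, outerA_spec M s.toList (s.toList.length + 1) 0 0 (by omega)]
  simp
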